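-- pv_equiv track=rewrite | github.com/Zathiald/ProgrammingParadigm | Bootcamp.py | calculate_max_lectures
-- ===== SOURCE A (Python) =====
-- def calculate_max_lectures(n, k1, k2, days):
--     # dp[i][j] will represent the maximum number of lectures for the first i days,
--     # where j is the number of lectures on the i-th day.
--     dp = [[-1] * (k1 + 1) for _ in range(n + 1)]
--     dp[0][0] = 0
--
--     for i in range(1, n + 1):
--         if days[i - 1] == '0':
--             for j in range(k1 + 1):
--                 dp[i][0] = max(dp[i][0], dp[i - 1][j])
--         else:
--             for j in range(k1 + 1):
--                 for k in range(k1 + 1):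
--                     if j + k <= k2 and dp[i - 1][k] != -1:
--                         dp[i][j] = max(dp[i][j], dp[i - 1][k] + j)
--
--     return max(dp[n])
-- ===== SOURCE B (Python) =====
-- def calculate_max_lectures(n, k1, k2, days):
--     # One row at a time; for a lecture day, a prefix-maximum of the previous
--     # row answers each state in O(1), so a day costs O(k1) instead of O(k1^2).
--     prev = [-1] * (k1 + 1)
--     prev[0] = 0
--     for ch in days[:n]:
--         if ch == '0':
--             row = [-1] * (k1 + 1)
--             row[0] = max(prev)
--         else:
--             pm = []
--             best = -1
--             for v in prev:
--                 best = max(best, v)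
--                 pm.append(best)
--             row = []
--             for j in range(k1 + 1):
--                 m = min(k1, k2 - j)
--                 if m >= 0 and pm[m] != -1:
--                     row.append(pm[m] + j)
--                 else:
--                     row.append(-1)
--         prev = row
--     return max(prev)
-- ===== Notes on version B (the rewrite author's own statement) =====
-- stated objective: faster
-- what changed: B keeps only one DP row and, on a lecture day, answers every state from a precomputed prefix-maximum of the previous row in O(1), replacing A's full table and its quadratic inner double loop over (j,k); O(n*k1^2) becomes O(n*k1).
import Mathlib
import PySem

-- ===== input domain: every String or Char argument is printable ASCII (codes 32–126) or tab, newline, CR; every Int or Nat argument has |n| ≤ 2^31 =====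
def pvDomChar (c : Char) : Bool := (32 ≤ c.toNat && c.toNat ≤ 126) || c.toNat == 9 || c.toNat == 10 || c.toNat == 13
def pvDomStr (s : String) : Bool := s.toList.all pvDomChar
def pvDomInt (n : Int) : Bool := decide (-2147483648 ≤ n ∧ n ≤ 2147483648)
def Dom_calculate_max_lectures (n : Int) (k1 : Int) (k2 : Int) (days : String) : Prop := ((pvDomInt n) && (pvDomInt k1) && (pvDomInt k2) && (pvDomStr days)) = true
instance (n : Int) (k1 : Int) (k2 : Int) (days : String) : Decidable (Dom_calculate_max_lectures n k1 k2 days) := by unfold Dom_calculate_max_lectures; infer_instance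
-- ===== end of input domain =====

-- B replaces A's quadratic-per-day table DP by a single row updated through a
-- prefix-maximum of the previous row (objective: faster, O(n*k1) vs O(n*k1^2)).

-- ===== PORT A =====
def calculate_max_lectures (n : Int) (k1 : Int) (k2 : Int) (days : String) : Int :=
  -- dp = [[-1] * (k1 + 1) for _ in range(n + 1)]
  let dp : List (List Int) := List.replicate (n+1).toNat (List.replicate (k1+1).toNat (-1))
  -- dp[0][0] = 0   (indices in range whenever Python does not raise; pySetD/pyGetD are exact there)
  let dp := PySem.List.pySetD dp 0 (PySem.List.pySetD (PySem.List.pyGetD dp 0 []) 0 0)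
  let dp := (PySem.List.pyRange 1 (n+1) 1).foldl (fun dp i =>
    if PySem.Str.pyGet? days (i-1) = some '0' then
      (PySem.List.pyRange 0 (k1+1) 1).foldl (fun dp j =>
        PySem.List.pySetD dp i (PySem.List.pySetD (PySem.List.pyGetD dp i []) 0
          (max (PySem.List.pyGetD (PySem.List.pyGetD dp i []) 0 0)
               (PySem.List.pyGetD (PySem.List.pyGetD dp (i-1) []) j 0)))) dp
    else
      (PySem.List.pyRange 0 (k1+1) 1).foldl (fun dp j =>
        (PySem.List.pyRange 0 (k1+1) 1).foldl (fun dp k =>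
          if j + k ≤ k2 ∧ PySem.List.pyGetD (PySem.List.pyGetD dp (i-1) []) k 0 ≠ -1 then
            PySem.List.pySetD dp i (PySem.List.pySetD (PySem.List.pyGetD dp i []) j
              (max (PySem.List.pyGetD (PySem.List.pyGetD dp i []) j 0)
                   (PySem.List.pyGetD (PySem.List.pyGetD dp (i-1) []) k 0 + j)))
          else dp) dp) dp) dp
  (PySem.List.max? (PySem.List.pyGetD dp n []) (fun x => x)).getD 0

-- ===== PORT B =====
def calculate_max_lectures_alt (n : Int) (k1 : Int) (k2 : Int) (days : String) : Int :=
  let prev : List Int := List.replicate (k1+1).toNat (-1)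
  let prev := PySem.List.pySetD prev 0 0
  let prev := (PySem.List.slice days.toList none (some n)).foldl (fun prev ch =>
    if ch = '0' then
      let row : List Int := List.replicate (k1+1).toNat (-1)
      PySem.List.pySetD row 0 ((PySem.List.max? prev (fun x => x)).getD 0)
    else
      let pm := (prev.foldl (fun (s : List Int × Int) v =>
        (s.1 ++ [max s.2 v], max s.2 v)) ([], -1)).1
      (PySem.List.pyRange 0 (k1+1) 1).foldl (fun row j =>
        let m := min k1 (k2 - j)
        if 0 ≤ m ∧ PySem.List.pyGetD pm m 0 ≠ -1 then
          row ++ [PySem.List.pyGetD pm m 0 + j]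
        else row ++ [-1]) []) prev
  (PySem.List.max? prev (fun x => x)).getD 0

-- ===== PRECONDITION & SPEC =====
-- Pre_ is exactly where Python A returns: it raises IndexError when n < 0 or k1 < 0
-- (dp[0][0] does not exist) and when days has fewer than n characters (days[i-1]).
def Pre_calculate_max_lectures (n : Int) (k1 : Int) (k2 : Int) (days : String) : Prop :=
  0 ≤ n ∧ 0 ≤ k1 ∧ n ≤ (days.toList.length : Int)
instance (n : Int) (k1 : Int) (k2 : Int) (days : String) : Decidable (Pre_calculate_max_lectures n k1 k2 days) := by unfold Pre_calculate_max_lectures; infer_instance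
def pvWitness_calculate_max_lectures : Int × Int × Int × String := (2, 2, 3, "10")

def Spec_calculate_max_lectures (n : Int) (k1 : Int) (k2 : Int) (days : String) (out : Int) : Prop := out = calculate_max_lectures_alt n k1 k2 days
instance (n : Int) (k1 : Int) (k2 : Int) (days : String) (out : Int) : Decidable (Spec_calculate_max_lectures n k1 k2 days out) := by unfold Spec_calculate_max_lectures; infer_instance

-- ===== CLAIM (what is proved, stated in full; the proofs are below) =====
def Claim_equal_calculate_max_lectures : Prop := ∀ (n : Int) (k1 : Int) (k2 : Int) (days : String), Dom_calculate_max_lectures n k1 k2 days → Pre_calculate_max_lectures n k1 k2 days → Spec_calculate_max_lectures n k1 k2 days (calculate_max_lectures n k1 k2 days)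

-- ===== LEMMAS AND PROOFS =====

-- reference per-day row transition (the mathematical DP both ports compute)
def pvPfx (P : List Int) (t : Nat) : Int := (P.take t).foldl max (-1)

def pvEntry (k1 k2 : Int) (P : List Int) (jN : Nat) : Int :=
  if 0 ≤ min k1 (k2 - (jN : Int)) ∧ pvPfx P ((min k1 (k2 - (jN : Int))).toNat + 1) ≠ -1
  then pvPfx P ((min k1 (k2 - (jN : Int))).toNat + 1) + (jN : Int) else -1

def pvRow (k1 k2 : Int) (P : List Int) (c : Char) : List Int :=
  if c = '0' then (P.foldl max (-1)) :: List.replicate k1.toNat (-1)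
  else (List.range (k1.toNat + 1)).map (pvEntry k1 k2 P)

def pvP0 (k1 : Int) : List Int := (0 : Int) :: List.replicate k1.toNat (-1)

def pvGood (k1 : Int) (P : List Int) : Prop :=
  P.length = k1.toNat + 1 ∧ ∀ x ∈ P, (-1 : Int) ≤ x

-- generic list-surgery lemmas ------------------------------------------------

theorem pv_getD_set_ne {α : Type} (l : List α) (i j : Nat) (v : α) (d : α) (h : i ≠ j) :
    (l.set i v).getD j d = l.getD j d := by
  simp [List.getD_eq_getElem?_getD, List.getElem?_set, h]

theorem pv_getD_set_self {α : Type} (l : List α) (i : Nat) (v : α) (d : α) (h : i < l.length) :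
    (l.set i v).getD i d = v := by
  simp [List.getD_eq_getElem?_getD, List.getElem?_set, h]

theorem pv_set_getD_self {α : Type} (l : List α) (i : Nat) (d : α) : l.set i (l.getD i d) = l := by
  apply List.ext_getElem?
  intro j
  by_cases h : i = j
  · by_cases hlt : j < l.length
    · simp [List.getElem?_set, h, List.getD_eq_getElem?_getD, hlt, List.getElem?_eq_getElem hlt]
    · simp [List.getElem?_set, h, hlt, List.getElem?_eq_none (Nat.le_of_not_lt hlt)]
  · simp [List.getElem?_set, h]

theorem pv_set_oor {α : Type} (l : List α) (i : Nat) (v : α) (h : ¬ i < l.length) :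
    l.set i v = l :=
  List.set_eq_of_length_le (by omega)

theorem pv_foldl_table {α : Type} (iN pN : Nat) (hne : pN ≠ iN)
    (G : List Int → List Int → α → List Int) (l : List α) (dp : List (List Int)) :
    l.foldl (fun d k => d.set iN (G (d.getD pN []) (d.getD iN []) k)) dp
      = dp.set iN (l.foldl (fun r k => G (dp.getD pN []) r k) (dp.getD iN [])) := by
  induction l generalizing dp with
  | nil => simp only [List.foldl_nil]; exact (pv_set_getD_self _ _ _).symm
  | cons k l ih =>
    simp only [List.foldl_cons]
    rw [ih]
    by_cases h : iN < dp.length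
    · rw [pv_getD_set_ne _ _ _ _ _ (by omega), pv_getD_set_self _ _ _ _ h, List.set_set]
    · rw [pv_set_oor _ _ _ h, pv_set_oor _ _ _ h, pv_set_oor _ _ _ h]

theorem pv_foldl_cell {α : Type} (iN : Nat) (g : Int → α → Int) (l : List α) (R : List Int) :
    l.foldl (fun R k => R.set iN (g (R.getD iN 0) k)) R
      = R.set iN (l.foldl g (R.getD iN 0)) := by
  induction l generalizing R with
  | nil => simp only [List.foldl_nil]; exact (pv_set_getD_self _ _ _).symm
  | cons k l ih =>
    simp only [List.foldl_cons]
    rw [ih]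
    by_cases h : iN < R.length
    · rw [pv_getD_set_self _ _ _ _ h, List.set_set]
    · rw [pv_set_oor _ _ _ h, pv_set_oor _ _ _ h, pv_set_oor _ _ _ h]

theorem pv_map_getD (P : List Int) : (List.range P.length).map (fun k => P.getD k 0) = P := by
  apply List.ext_getElem
  · simp
  · intro i h1 h2
    simp [List.getD_eq_getElem?_getD, List.getElem?_eq_getElem h2]

theorem pv_foldl_max_range (P : List Int) (v : Int) :
    (List.range P.length).foldl (fun c kN => max c (P.getD kN 0)) v = P.foldl max v := by
  conv_rhs => rw [← pv_map_getD P]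
  rw [List.foldl_map]

theorem pv_foldl_build (h : Nat → Int → Int) (T : Nat) :
    ∀ t, t ≤ T →
    (List.range t).foldl (fun R jN => R.set jN (h jN (R.getD jN 0))) (List.replicate T (-1))
      = (List.range t).map (fun jN => h jN (-1)) ++ List.replicate (T - t) (-1) := by
  intro t
  induction t with
  | zero => simp
  | succ t ih =>
    intro ht
    rw [List.range_succ, List.foldl_append, ih (by omega), List.foldl_cons, List.foldl_nil]
    have hlen : ((List.range t).map (fun jN => h jN (-1))).length = t := by simp
    have hrep : List.replicate (T - t) (-1 : Int) = -1 :: List.replicate (T - (t+1)) (-1) := by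
      have : T - t = (T - (t+1)) + 1 := by omega
      rw [this, List.replicate_succ]
    have hgd : (((List.range t).map (fun jN => h jN (-1))) ++ List.replicate (T - t) (-1 : Int)).getD t 0 = -1 := by
      rw [List.getD_eq_getElem?_getD, List.getElem?_append_right (by omega), hrep]
      simp [hlen]
    rw [hgd, hrep]
    simp [List.set_append, hlen, List.range_succ]

-- B's prefix-max scan ---------------------------------------------------------

theorem pv_pm_spec (P : List Int) : ∀ (acc : List Int) (b : Int),
    P.foldl (fun (s : List Int × Int) v => (s.1 ++ [max s.2 v], max s.2 v)) (acc, b)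
      = (acc ++ (List.range P.length).map (fun t => (P.take (t+1)).foldl max b), P.foldl max b) := by
  induction P with
  | nil => simp
  | cons x P ih =>
    intro acc b
    simp only [List.foldl_cons]
    rw [ih]
    simp only [List.length_cons, List.range_succ_eq_map, List.map_cons, List.map_map,
      List.take_succ_cons, List.foldl_cons, List.take_zero, List.foldl_nil, Function.comp_def,
      List.append_assoc, List.singleton_append, Prod.mk.injEq, and_true]

-- core arithmetic: A's filtered running max = shifted prefix max ---------------

def pvF (P : List Int) (k2 j : Int) (t : Nat) : Int :=
  (List.range t).foldl (fun c (kN : Nat) =>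
    if j + (kN : Int) ≤ k2 ∧ P.getD kN 0 ≠ -1 then max c (P.getD kN 0 + j) else c) (-1)

def pvS (P : List Int) (k2 j : Int) (t : Nat) : Int :=
  (List.range t).foldl (fun c (kN : Nat) =>
    if j + (kN : Int) ≤ k2 then max c (P.getD kN 0) else c) (-1)

theorem pvF_succ (P : List Int) (k2 j : Int) (t : Nat) :
    pvF P k2 j (t+1) = if j + (t : Int) ≤ k2 ∧ P.getD t 0 ≠ -1
      then max (pvF P k2 j t) (P.getD t 0 + j) else pvF P k2 j t := by
  unfold pvF; rw [List.range_succ, List.foldl_append]; simp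

theorem pvS_succ (P : List Int) (k2 j : Int) (t : Nat) :
    pvS P k2 j (t+1) = if j + (t : Int) ≤ k2 then max (pvS P k2 j t) (P.getD t 0) else pvS P k2 j t := by
  unfold pvS; rw [List.range_succ, List.foldl_append]; simp

theorem pv_core1 (P : List Int) (hP : ∀ x ∈ P, (-1 : Int) ≤ x) (k2 j : Int) (hj : 0 ≤ j) :
    ∀ t, t ≤ P.length →
      (-1 ≤ pvS P k2 j t ∧ pvF P k2 j t = (if pvS P k2 j t = -1 then -1 else pvS P k2 j t + j)) := by
  intro t
  induction t with
  | zero => simp [pvS, pvF]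
  | succ t ih =>
    intro ht
    obtain ⟨ih1, ih2⟩ := ih (by omega)
    have hp : (-1 : Int) ≤ P.getD t 0 := by
      rw [List.getD_eq_getElem _ _ (by omega)]
      exact hP _ (List.getElem_mem _)
    rw [pvS_succ, pvF_succ, ih2]
    constructor <;> split_ifs <;> omega

theorem pv_core2 (P : List Int) (k2 j : Int) :
    ∀ t, t ≤ P.length → pvS P k2 j t = pvPfx P (min t (k2 - j + 1).toNat) := by
  intro t
  induction t with
  | zero => simp [pvS, pvPfx]
  | succ t ih =>
    intro ht
    rw [pvS_succ, ih (by omega)]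
    by_cases hc : j + (t : Int) ≤ k2
    · have htM : t < (k2 - j + 1).toNat := by omega
      have h1 : min (t+1) (k2 - j + 1).toNat = (min t (k2 - j + 1).toNat) + 1 := by omega
      have h2 : min t (k2 - j + 1).toNat = t := by omega
      rw [if_pos hc, h1, h2]
      show max (pvPfx P t) (P.getD t 0) = pvPfx P (t+1)
      unfold pvPfx
      rw [List.take_succ, List.getElem?_eq_getElem (by omega), List.foldl_append,
        List.getD_eq_getElem _ _ (by omega : t < P.length)]
      simp
    · have h1 : min (t+1) (k2 - j + 1).toNat = min t (k2 - j + 1).toNat := by omega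
      rw [if_neg hc, h1]

theorem pv_pfx_ge (P : List Int) (t : Nat) : (-1 : Int) ≤ pvPfx P t := by
  unfold pvPfx
  exact (PySem.List.le_foldl_max _ _).1

theorem pv_entry_eq (P : List Int) (hP : ∀ x ∈ P, (-1 : Int) ≤ x) (k1 k2 : Int)
    (hk : 0 ≤ k1) (hlen : P.length = k1.toNat + 1) (jN : Nat) :
    pvF P k2 (jN : Int) (k1.toNat + 1) = pvEntry k1 k2 P jN := by
  have hj : (0 : Int) ≤ (jN : Int) := by positivity
  have h1 := (pv_core1 P hP k2 (jN : Int) hj (k1.toNat + 1) (by omega)).2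
  have h2 := pv_core2 P k2 (jN : Int) (k1.toNat + 1) (by omega)
  rw [h1, h2]
  unfold pvEntry
  by_cases hm : 0 ≤ min k1 (k2 - (jN : Int))
  · have hmm : min (k1.toNat + 1) (k2 - (jN : Int) + 1).toNat
        = (min k1 (k2 - (jN : Int))).toNat + 1 := by omega
    rw [hmm]
    split_ifs with hA hB hB
    · exact absurd hA hB.2
    · rfl
    · rfl
    · exact absurd ⟨hm, hA⟩ hB
  · have hmm : min (k1.toNat + 1) (k2 - (jN : Int) + 1).toNat = 0 := by omega
    rw [hmm]
    have : pvPfx P 0 = -1 := by simp [pvPfx]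
    rw [this, if_pos rfl, if_neg (fun h => hm h.1)]

-- pvGood is preserved ---------------------------------------------------------

theorem pv_good_p0 (k1 : Int) : pvGood k1 (pvP0 k1) := by
  constructor
  · simp [pvP0]
  · intro x hx
    simp only [pvP0, List.mem_cons, List.mem_replicate] at hx
    rcases hx with h | ⟨_, h⟩ <;> omega

theorem pv_good_row (k1 k2 : Int) (P : List Int) (c : Char) (h : pvGood k1 P) :
    pvGood k1 (pvRow k1 k2 P c) := by
  unfold pvRow
  split_ifs
  · constructor
    · simp
    · intro x hx
      simp only [List.mem_cons, List.mem_replicate] at hx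
      rcases hx with hx | ⟨_, hx⟩
      · subst hx
        have := (PySem.List.le_foldl_max P (-1 : Int)).1
        omega
      · omega
  · constructor
    · simp
    · intro x hx
      simp only [List.mem_map] at hx
      obtain ⟨jN, _, hx⟩ := hx
      subst hx
      unfold pvEntry
      split_ifs with hc
      · have := pv_pfx_ge P ((min k1 (k2 - (jN : Int))).toNat + 1)
        have hj : (0 : Int) ≤ (jN : Int) := by positivity
        rcases hc with ⟨_, hne⟩
        omega
      · omega

-- the B port computes pvRow day by day ----------------------------------------

theorem pv_b_step (k1 k2 : Int) (hk : 0 ≤ k1) (P : List Int) (h : pvGood k1 P) (c : Char) :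
    (if c = '0' then
      PySem.List.pySetD (List.replicate (k1+1).toNat (-1)) 0 ((PySem.List.max? P (fun x => x)).getD 0)
    else
      let pm := (P.foldl (fun (s : List Int × Int) v =>
        (s.1 ++ [max s.2 v], max s.2 v)) ([], -1)).1
      (PySem.List.pyRange 0 (k1+1) 1).foldl (fun row j =>
        let m := min k1 (k2 - j)
        if 0 ≤ m ∧ PySem.List.pyGetD pm m 0 ≠ -1 then
          row ++ [PySem.List.pyGetD pm m 0 + j]
        else row ++ [-1]) [])
    = pvRow k1 k2 P c := by
  obtain ⟨hlen, hge⟩ := h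
  have hK : (k1+1).toNat = k1.toNat + 1 := by omega
  unfold pvRow
  by_cases hc : c = '0'
  · rw [if_pos hc, if_pos hc]
    obtain ⟨x, ts, rfl⟩ : ∃ x ts, P = x :: ts := by
      cases P with
      | nil => simp at hlen
      | cons x ts => exact ⟨x, ts, rfl⟩
    rw [PySem.List.max?_id_cons]
    have hx : (-1 : Int) ≤ x := hge x (by simp)
    rw [hK, List.replicate_succ, PySem.List.pySetD_of_nonneg _ _ (by omega)]
    simp only [Int.toNat_zero, List.set_cons_zero, Option.getD_some, List.foldl_cons]
    have hx' : max (-1 : Int) x = x := by omega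
    rw [hx']
  · rw [if_neg hc, if_neg hc]
    have hpm := pv_pm_spec P [] (-1)
    set pm := (P.foldl (fun (s : List Int × Int) v => (s.1 ++ [max s.2 v], max s.2 v)) ([], -1)).1 with hpmdef
    have hpm1 : pm = (List.range P.length).map (fun t => pvPfx P (t+1)) := by
      rw [hpmdef, hpm]
      simp [pvPfx]
    have hpmlen : pm.length = k1.toNat + 1 := by rw [hpm1]; simp [hlen]
    have hrange : PySem.List.pyRange 0 (k1+1) 1
        = (List.range (k1.toNat+1)).map (fun kN : Nat => ((kN : Int))) := by
      rw [PySem.List.pyRange_one]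
      simp [hK]
    rw [hrange, List.foldl_map]
    have hbody : ∀ (row : List Int), ∀ jN ∈ List.range (k1.toNat+1),
        (fun x (y : Nat) =>
          let m := min k1 (k2 - (y : Int))
          if 0 ≤ m ∧ PySem.List.pyGetD pm m 0 ≠ -1 then x ++ [PySem.List.pyGetD pm m 0 + (y : Int)]
          else x ++ [-1]) row jN
        = row ++ [pvEntry k1 k2 P jN] := by
      intro row jN _
      dsimp only
      unfold pvEntry
      by_cases hm : 0 ≤ min k1 (k2 - (jN : Int))
      · have hg : PySem.List.pyGetD pm (min k1 (k2 - (jN : Int))) 0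
            = pvPfx P ((min k1 (k2 - (jN : Int))).toNat + 1) := by
          rw [PySem.List.pyGetD_eq_getElem _ _ hm (by rw [hpmlen]; omega)]
          simp [hpm1, hlen, pvPfx, show (min k1 (k2 - (jN:Int))).toNat < k1.toNat + 1 by omega]
        rw [hg]
        split_ifs <;> rfl
      · rw [if_neg (fun hh => hm hh.1), if_neg (fun hh => hm hh.1)]
    rw [PySem.List.foldl_congr_mem _ _
      (fun (row : List Int) (jN : Nat) => row ++ [pvEntry k1 k2 P jN]) _ hbody,
      PySem.List.foldl_append_singleton_eq_map]
    simp

-- the A port's day body writes pvRow into row i --------------------------------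

theorem pv_a_step (k1 k2 : Int) (hk : 0 ≤ k1) (dp : List (List Int)) (t : Nat)
    (c : Char) (dpPrev : List Int) (hprev : dp.getD t [] = dpPrev)
    (hcur : dp.getD (t+1) [] = List.replicate (k1.toNat+1) (-1))
    (hG : pvGood k1 dpPrev) :
    (if some c = some '0' then
      (PySem.List.pyRange 0 (k1+1) 1).foldl (fun dp j =>
        PySem.List.pySetD dp ((t:Int)+1) (PySem.List.pySetD (PySem.List.pyGetD dp ((t:Int)+1) []) 0
          (max (PySem.List.pyGetD (PySem.List.pyGetD dp ((t:Int)+1) []) 0 0)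
               (PySem.List.pyGetD (PySem.List.pyGetD dp (((t:Int)+1)-1) []) j 0)))) dp
    else
      (PySem.List.pyRange 0 (k1+1) 1).foldl (fun dp j =>
        (PySem.List.pyRange 0 (k1+1) 1).foldl (fun dp k =>
          if j + k ≤ k2 ∧ PySem.List.pyGetD (PySem.List.pyGetD dp (((t:Int)+1)-1) []) k 0 ≠ -1 then
            PySem.List.pySetD dp ((t:Int)+1) (PySem.List.pySetD (PySem.List.pyGetD dp ((t:Int)+1) []) j
              (max (PySem.List.pyGetD (PySem.List.pyGetD dp ((t:Int)+1) []) j 0)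
                   (PySem.List.pyGetD (PySem.List.pyGetD dp (((t:Int)+1)-1) []) k 0 + j)))
          else dp) dp) dp)
    = dp.set (t+1) (pvRow k1 k2 dpPrev c) := by
  obtain ⟨hlen, hge⟩ := hG
  have hK : (k1+1).toNat = k1.toNat + 1 := by omega
  have e1 : ((t : Int) + 1) = (((t+1 : Nat)) : Int) := by push_cast; ring
  have e2 : ((t : Int) + 1) - 1 = ((t : Nat) : Int) := by push_cast; ring
  have hrange : PySem.List.pyRange 0 (k1+1) 1
      = (List.range (k1.toNat+1)).map (fun kN : Nat => ((kN : Int))) := by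
    rw [PySem.List.pyRange_one]
    simp [hK]
  have hset0 : ∀ (xs : List Int) (v : Int), PySem.List.pySetD xs 0 v = xs.set 0 v := by
    intro xs v
    rw [PySem.List.pySetD_of_nonneg _ _ le_rfl]
    rfl
  have hget0 : ∀ (xs : List Int) (d : Int), PySem.List.pyGetD xs 0 d = xs.getD 0 d := by
    intro xs d
    rw [show (0 : Int) = ((0 : Nat) : Int) from rfl, PySem.List.pyGetD_natCast]
  rw [e2, e1]
  simp only [PySem.List.pySetD_natCast, PySem.List.pyGetD_natCast, hset0, hget0, hrange,
    List.foldl_map]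
  by_cases hc : c = '0'
  · rw [if_pos (by rw [hc]), pvRow, if_pos hc]
    rw [pv_foldl_table (t+1) t (by omega)
      (fun P R (y : Nat) => R.set 0 (max (R.getD 0 0) (P.getD y 0)))]
    rw [hprev, hcur]
    rw [pv_foldl_cell 0 (fun cacc (y : Nat) => max cacc (dpPrev.getD y 0))]
    have h0 : (List.replicate (k1.toNat+1) (-1 : Int)).getD 0 0 = -1 := by
      simp [List.replicate_succ]
    rw [h0]
    have hfold : (List.range (k1.toNat+1)).foldl (fun cacc (y : Nat) => max cacc (dpPrev.getD y 0)) (-1)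
        = dpPrev.foldl max (-1) := by
      rw [← hlen]
      exact pv_foldl_max_range dpPrev (-1)
    rw [hfold, List.replicate_succ, List.set_cons_zero]
  · rw [if_neg (by simpa using hc), pvRow, if_neg hc]
    have hinner : ∀ (d : List (List Int)) (y : Nat),
        (List.range (k1.toNat+1)).foldl (fun x (kN : Nat) =>
          if (y : Int) + (kN : Int) ≤ k2 ∧ (x.getD t []).getD kN 0 ≠ -1 then
            x.set (t+1) ((x.getD (t+1) []).set y
              (max ((x.getD (t+1) []).getD y 0) ((x.getD t []).getD kN 0 + (y : Int))))
          else x) d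
        = d.set (t+1) ((List.range (k1.toNat+1)).foldl (fun R (kN : Nat) =>
            if (y : Int) + (kN : Int) ≤ k2 ∧ ((d.getD t []).getD kN 0) ≠ -1 then
              R.set y (max (R.getD y 0) ((d.getD t []).getD kN 0 + (y : Int)))
            else R) (d.getD (t+1) [])) := by
      intro d y
      rw [PySem.List.foldl_congr_mem _ _
        (fun x (kN : Nat) => x.set (t+1)
          ((fun P R (kN : Nat) =>
            if (y : Int) + (kN : Int) ≤ k2 ∧ P.getD kN 0 ≠ -1 then
              R.set y (max (R.getD y 0) (P.getD kN 0 + (y : Int)))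
            else R) (x.getD t []) (x.getD (t+1) []) kN)) _
        (by
          intro acc x _
          dsimp only
          split_ifs with h
          · rfl
          · exact (pv_set_getD_self _ _ _).symm)]
      exact pv_foldl_table (t+1) t (by omega)
        (fun P R (kN : Nat) =>
          if (y : Int) + (kN : Int) ≤ k2 ∧ P.getD kN 0 ≠ -1 then
            R.set y (max (R.getD y 0) (P.getD kN 0 + (y : Int)))
          else R) _ d
    rw [PySem.List.foldl_congr_mem _ _
      (fun d (y : Nat) => d.set (t+1)
        ((fun P R (y : Nat) => (List.range (k1.toNat+1)).foldl (fun R (kN : Nat) =>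
            if (y : Int) + (kN : Int) ≤ k2 ∧ P.getD kN 0 ≠ -1 then
              R.set y (max (R.getD y 0) (P.getD kN 0 + (y : Int)))
            else R) R) (d.getD t []) (d.getD (t+1) []) y)) _
      (by intro acc x _; exact hinner acc x)]
    rw [pv_foldl_table (t+1) t (by omega)
      (fun P R (y : Nat) => (List.range (k1.toNat+1)).foldl (fun R (kN : Nat) =>
            if (y : Int) + (kN : Int) ≤ k2 ∧ P.getD kN 0 ≠ -1 then
              R.set y (max (R.getD y 0) (P.getD kN 0 + (y : Int)))
            else R) R)]
    rw [hprev, hcur]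
    congr 1
    have hrow : ∀ (R : List Int), ∀ y ∈ List.range (k1.toNat+1),
        (List.range (k1.toNat+1)).foldl (fun R (kN : Nat) =>
            if (y : Int) + (kN : Int) ≤ k2 ∧ dpPrev.getD kN 0 ≠ -1 then
              R.set y (max (R.getD y 0) (dpPrev.getD kN 0 + (y : Int)))
            else R) R
        = R.set y ((fun (y : Nat) (v : Int) => (List.range (k1.toNat+1)).foldl (fun cacc (kN : Nat) =>
            if (y : Int) + (kN : Int) ≤ k2 ∧ dpPrev.getD kN 0 ≠ -1 then
              max cacc (dpPrev.getD kN 0 + (y : Int))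
            else cacc) v) y (R.getD y 0)) := by
      intro R y _
      rw [PySem.List.foldl_congr_mem _ _
        (fun R (kN : Nat) => R.set y
          ((fun cacc (kN : Nat) =>
            if (y : Int) + (kN : Int) ≤ k2 ∧ dpPrev.getD kN 0 ≠ -1 then
              max cacc (dpPrev.getD kN 0 + (y : Int))
            else cacc) (R.getD y 0) kN)) _
        (by
          intro acc x _
          dsimp only
          split_ifs with h
          · rfl
          · exact (pv_set_getD_self _ _ _).symm)]
      exact pv_foldl_cell y
        (fun cacc (kN : Nat) =>
          if (y : Int) + (kN : Int) ≤ k2 ∧ dpPrev.getD kN 0 ≠ -1 then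
            max cacc (dpPrev.getD kN 0 + (y : Int))
          else cacc) _ R
    rw [PySem.List.foldl_congr_mem _ _
      (fun R (y : Nat) => R.set y ((fun (y : Nat) (v : Int) =>
        (List.range (k1.toNat+1)).foldl (fun cacc (kN : Nat) =>
            if (y : Int) + (kN : Int) ≤ k2 ∧ dpPrev.getD kN 0 ≠ -1 then
              max cacc (dpPrev.getD kN 0 + (y : Int))
            else cacc) v) y (R.getD y 0))) _ hrow]
    rw [pv_foldl_build (fun (y : Nat) (v : Int) =>
      (List.range (k1.toNat+1)).foldl (fun cacc (kN : Nat) =>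
            if (y : Int) + (kN : Int) ≤ k2 ∧ dpPrev.getD kN 0 ≠ -1 then
              max cacc (dpPrev.getD kN 0 + (y : Int))
            else cacc) v) (k1.toNat+1) (k1.toNat+1) (le_refl (k1.toNat+1))]
    simp only [Nat.sub_self, List.replicate_zero, List.append_nil]
    apply List.map_congr_left
    intro y _
    exact pv_entry_eq dpPrev hge k1 k2 hk hlen y

-- main equivalence -----------------------------------------------------------

theorem pv_good_iter (k1 k2 : Int) (l : List Char) :
    ∀ (P : List Int), pvGood k1 P → pvGood k1 (l.foldl (pvRow k1 k2) P) := by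
  induction l with
  | nil => intro P h; exact h
  | cons c l ih =>
    intro P h
    exact ih _ (pv_good_row k1 k2 P c h)

theorem pv_b_fold (k1 k2 : Int) (hk : 0 ≤ k1) (l : List Char) :
    ∀ (P : List Int), pvGood k1 P →
      l.foldl (fun prev ch =>
        if ch = '0' then
          let row : List Int := List.replicate (k1+1).toNat (-1)
          PySem.List.pySetD row 0 ((PySem.List.max? prev (fun x => x)).getD 0)
        else
          let pm := (prev.foldl (fun (s : List Int × Int) v =>
            (s.1 ++ [max s.2 v], max s.2 v)) ([], -1)).1
          (PySem.List.pyRange 0 (k1+1) 1).foldl (fun row j =>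
            let m := min k1 (k2 - j)
            if 0 ≤ m ∧ PySem.List.pyGetD pm m 0 ≠ -1 then
              row ++ [PySem.List.pyGetD pm m 0 + j]
            else row ++ [-1]) []) P
      = l.foldl (pvRow k1 k2) P := by
  induction l with
  | nil => intro P _; rfl
  | cons c l ih =>
    intro P h
    simp only [List.foldl_cons]
    rw [show (if c = '0' then
          PySem.List.pySetD (List.replicate (k1+1).toNat (-1)) 0 ((PySem.List.max? P (fun x => x)).getD 0)
        else
          let pm := (P.foldl (fun (s : List Int × Int) v =>
            (s.1 ++ [max s.2 v], max s.2 v)) ([], -1)).1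
          (PySem.List.pyRange 0 (k1+1) 1).foldl (fun row j =>
            let m := min k1 (k2 - j)
            if 0 ≤ m ∧ PySem.List.pyGetD pm m 0 ≠ -1 then
              row ++ [PySem.List.pyGetD pm m 0 + j]
            else row ++ [-1]) []) = pvRow k1 k2 P c from pv_b_step k1 k2 hk P h c]
    exact ih _ (pv_good_row k1 k2 P c h)

theorem pv_main (n k1 k2 : Int) (days : String) (hn : 0 ≤ n) (hk : 0 ≤ k1)
    (hlen : n ≤ (days.toList.length : Int)) :
    calculate_max_lectures n k1 k2 days = calculate_max_lectures_alt n k1 k2 days := by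
  have hK : (k1+1).toNat = k1.toNat + 1 := by omega
  have hN : (n+1).toNat = n.toNat + 1 := by omega
  have hn' : (n : Int) = ((n.toNat : Nat) : Int) := by omega
  have hNlen0 : n.toNat ≤ days.toList.length := by omega
  set N := n.toNat with hNdef
  set cs := days.toList with hcs
  set K := k1.toNat with hKdef
  set Rinit : List Int := List.replicate (K+1) (-1) with hR
  set iter : Nat → List Int := fun r => (cs.take r).foldl (pvRow k1 k2) (pvP0 k1) with hiter
  have hNlen : N ≤ cs.length := hNlen0
  -- the initial table of port A
  have hdp0 : PySem.List.pySetD (List.replicate (n+1).toNat (List.replicate (k1+1).toNat (-1))) 0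
      (PySem.List.pySetD (PySem.List.pyGetD (List.replicate (n+1).toNat (List.replicate (k1+1).toNat (-1))) 0 []) 0 0)
      = pvP0 k1 :: List.replicate N Rinit := by
    rw [hN, hK, List.replicate_succ,
      show ((0:Int)) = ((0:Nat):Int) from rfl, PySem.List.pyGetD_natCast, PySem.List.pySetD_natCast,
      PySem.List.pySetD_natCast]
    simp [pvP0, hR, hKdef, List.replicate_succ]
  -- the loop invariant of port A
  have key : ∀ t : Nat, t ≤ N →
      (PySem.List.pyRange 1 ((t : Int)+1) 1).foldl (fun dp i =>
        if PySem.Str.pyGet? days (i-1) = some '0' then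
          (PySem.List.pyRange 0 (k1+1) 1).foldl (fun dp j =>
            PySem.List.pySetD dp i (PySem.List.pySetD (PySem.List.pyGetD dp i []) 0
              (max (PySem.List.pyGetD (PySem.List.pyGetD dp i []) 0 0)
                   (PySem.List.pyGetD (PySem.List.pyGetD dp (i-1) []) j 0)))) dp
        else
          (PySem.List.pyRange 0 (k1+1) 1).foldl (fun dp j =>
            (PySem.List.pyRange 0 (k1+1) 1).foldl (fun dp k =>
              if j + k ≤ k2 ∧ PySem.List.pyGetD (PySem.List.pyGetD dp (i-1) []) k 0 ≠ -1 then
                PySem.List.pySetD dp i (PySem.List.pySetD (PySem.List.pyGetD dp i []) j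
                  (max (PySem.List.pyGetD (PySem.List.pyGetD dp i []) j 0)
                       (PySem.List.pyGetD (PySem.List.pyGetD dp (i-1) []) k 0 + j)))
              else dp) dp) dp) (pvP0 k1 :: List.replicate N Rinit)
      = (List.range (t+1)).map iter ++ List.replicate (N - t) Rinit := by
    intro t
    induction t with
    | zero =>
      intro _
      rw [PySem.List.pyRange_one_eq_nil (a := 1) (b := ((0:Nat):Int)+1) (by norm_num)]
      simp [hiter, pvP0]
    | succ t ih =>
      intro ht
      have hcast : ((t+1 : Nat) : Int) + 1 = ((t : Int) + 1) + 1 := by push_cast; ring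
      rw [hcast, PySem.List.pyRange_one_succ_right (a := 1) (b := ((t:Nat):Int)+1) (by omega),
        List.foldl_append, ih (by omega), List.foldl_cons, List.foldl_nil]
      have hmlen : ((List.range (t+1)).map iter).length = t + 1 := by simp
      have hrep : List.replicate (N - t) Rinit = Rinit :: List.replicate (N - (t+1)) Rinit := by
        have : N - t = (N - (t+1)) + 1 := by omega
        rw [this, List.replicate_succ]
      have hprev : ((List.range (t+1)).map iter ++ List.replicate (N - t) Rinit).getD t [] = iter t := by
        rw [List.getD_eq_getElem?_getD, List.getElem?_append_left (by omega)]
        simp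
      have hcur : ((List.range (t+1)).map iter ++ List.replicate (N - t) Rinit).getD (t+1) [] = Rinit := by
        rw [List.getD_eq_getElem?_getD, List.getElem?_append_right (by omega), hrep]
        simp [hmlen]
      have hgood : pvGood k1 (iter t) := pv_good_iter k1 k2 _ _ (pv_good_p0 k1)
      have hch : PySem.Str.pyGet? days (((t : Int) + 1) - 1) = some (cs.getD t ' ') := by
        rw [show ((t : Int) + 1) - 1 = ((t : Nat) : Int) by push_cast; ring,
          PySem.Str.pyGet?_natCast, ← hcs, List.getElem?_eq_getElem (by omega),
          List.getD_eq_getElem _ _ (by omega)]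
      rw [hch]
      rw [pv_a_step k1 k2 hk _ t (cs.getD t ' ') (iter t) hprev (by rw [hcur, hR, hKdef]) hgood]
      rw [hrep, List.set_append]
      simp only [hmlen, Nat.lt_irrefl, if_neg (lt_irrefl (t+1)), Nat.sub_self, List.set_cons_zero]
      rw [if_neg (by exact not_false)]
      conv_rhs => rw [List.range_succ, List.map_append]
      have hiter1 : iter (t+1) = pvRow k1 k2 (iter t) (cs.getD t ' ') := by
        rw [hiter]
        simp only
        rw [List.take_succ, List.getElem?_eq_getElem (by omega), List.foldl_append,
          Option.toList_some, List.foldl_cons, List.foldl_nil,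
          List.getD_eq_getElem _ _ (by omega : t < cs.length)]
      rw [show List.map iter [t+1] = [iter (t+1)] from rfl, hiter1]
      simp [List.append_assoc]
  -- assemble both ports
  unfold calculate_max_lectures calculate_max_lectures_alt
  simp only [hdp0]
  rw [show (n + 1 : Int) = ((N : Nat) : Int) + 1 by omega]
  rw [key N (le_refl N)]
  rw [PySem.List.slice_to _ hn, ← hNdef, ← hcs]
  rw [show PySem.List.pySetD (List.replicate (k1+1).toNat (-1)) 0 0 = pvP0 k1 by
    rw [hK, List.replicate_succ, show ((0:Int)) = ((0:Nat):Int) from rfl,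
      PySem.List.pySetD_natCast, List.set_cons_zero]; rfl]
  rw [pv_b_fold k1 k2 hk (cs.take N) (pvP0 k1) (pv_good_p0 k1)]
  rw [hn', PySem.List.pyGetD_natCast]
  have hfin : ((List.range (N+1)).map iter ++ List.replicate (N - N) Rinit).getD N [] = iter N := by
    rw [List.getD_eq_getElem?_getD, List.getElem?_append_left (by simp)]
    simp
  rw [hfin]

-- ===== VERDICT (by name: the statement is the Claim_ definition above) =====
theorem calculate_max_lectures_spec : Claim_equal_calculate_max_lectures := by
  intro n k1 k2 days _ hpre
  exact pv_main n k1 k2 days hpre.1 hpre.2.1 hpre.2.2
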